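-- pv_equiv track=rewrite | github.com/clawdia108/Clawdia | scripts/_archive/nlp_task.py | find_best_agent
-- ===== SOURCE A (Python) =====
-- AGENT_CAPABILITIES = {
--     "spojka": ["briefing", "synthesis"],
--     "obchodak": ["crm", "scoring"],
--     "postak": ["email", "drafting"],
--     "strateg": ["research", "intel"],
--     "kalendar": ["calendar", "scheduling"],
--     "kontrolor": ["review", "quality"],
--     "archivar": ["knowledge", "archive"],
--     "udrzbar": ["crm", "priorities"],
--     "textar": ["writing", "email"],
--     "hlidac": ["tracking", "gamification"],
--     "planovac": ["planning", "focus"],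
--     "vyvojar": ["code", "analysis"],
-- }
--
-- def find_best_agent(capabilities):
--     """Find the best agent for given capabilities."""
--     scores = {}
--     for agent, caps in AGENT_CAPABILITIES.items():
--         overlap = len(set(capabilities) & set(caps))
--         if overlap > 0:
--             scores[agent] = overlap
--
--     if not scores:
--         return None
--     return max(scores, key=scores.get)
-- ===== SOURCE B (Python) =====
-- AGENT_CAPABILITIES = {
--     "spojka": ["briefing", "synthesis"],
--     "obchodak": ["crm", "scoring"],
--     "postak": ["email", "drafting"],
--     "strateg": ["research", "intel"],
--     "kalendar": ["calendar", "scheduling"],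
--     "kontrolor": ["review", "quality"],
--     "archivar": ["knowledge", "archive"],
--     "udrzbar": ["crm", "priorities"],
--     "textar": ["writing", "email"],
--     "hlidac": ["tracking", "gamification"],
--     "planovac": ["planning", "focus"],
--     "vyvojar": ["code", "analysis"],
-- }
--
-- def find_best_agent(capabilities):
--     """Find the best agent for given capabilities."""
--     cap_set = set(capabilities)
--     best_agent, best_score = None, 0
--     for agent, caps in AGENT_CAPABILITIES.items():
--         overlap = len(cap_set & set(caps))
--         if overlap > best_score:
--             best_agent, best_score = agent, overlap
--     return best_agent
-- ===== Notes on version B (the rewrite author's own statement) =====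
-- stated objective: simpler
-- what changed: Replaced the two-stage 'build a scores dict, then max(scores, key=scores.get)' with a single running-best pass over AGENT_CAPABILITIES that keeps best_agent/best_score and updates on strict '>', never materialising the dict; set(capabilities) is built once instead of per agent.
import Mathlib
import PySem

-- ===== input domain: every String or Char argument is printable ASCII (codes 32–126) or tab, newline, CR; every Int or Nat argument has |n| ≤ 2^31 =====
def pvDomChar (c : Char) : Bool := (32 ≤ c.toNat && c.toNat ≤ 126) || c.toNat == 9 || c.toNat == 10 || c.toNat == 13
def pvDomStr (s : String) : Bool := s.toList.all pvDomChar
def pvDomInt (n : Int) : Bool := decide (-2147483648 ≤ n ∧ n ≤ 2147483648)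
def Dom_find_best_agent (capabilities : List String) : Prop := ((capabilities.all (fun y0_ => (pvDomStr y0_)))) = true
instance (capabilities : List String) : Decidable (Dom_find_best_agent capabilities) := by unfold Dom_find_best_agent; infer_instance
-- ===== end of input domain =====

-- B replaces A's "build a scores dict, then max(scores, key=scores.get)" by a single
-- running-best pass (best_agent/best_score, strict '>'); same result, simpler shape.


-- ===== PORT A =====
def AGENT_CAPABILITIES : List (String × List String) :=
  [("spojka", ["briefing", "synthesis"]),
   ("obchodak", ["crm", "scoring"]),
   ("postak", ["email", "drafting"]),
   ("strateg", ["research", "intel"]),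
   ("kalendar", ["calendar", "scheduling"]),
   ("kontrolor", ["review", "quality"]),
   ("archivar", ["knowledge", "archive"]),
   ("udrzbar", ["crm", "priorities"]),
   ("textar", ["writing", "email"]),
   ("hlidac", ["tracking", "gamification"]),
   ("planovac", ["planning", "focus"]),
   ("vyvojar", ["code", "analysis"])]

-- len(set(capabilities) & set(caps))
def pvOverlap (capabilities caps : List String) : Int :=
  ((PySem.Set.inter (PySem.Set.ofList capabilities) (PySem.Set.ofList caps)).length : Int)

-- scores.get k on a key of the dict; getD _ 0 is exact since every key queried is present
def find_best_agent (capabilities : List String) : Option String :=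
  let scores : PySem.Dict String Int :=
    AGENT_CAPABILITIES.foldl
      (fun d p =>
        let overlap := pvOverlap capabilities p.2
        if overlap > 0 then d.insert p.1 overlap else d)
      PySem.Dict.empty
  if scores.size = 0 then none
  else PySem.List.max? scores.keys (fun k => scores.getD k 0)

-- ===== PORT B =====
def find_best_agent_alt (capabilities : List String) : Option String :=
  let capSet := PySem.Set.ofList capabilities
  let r :=
    AGENT_CAPABILITIES.foldl
      (fun (st : Option String × Int) p =>
        let overlap := ((PySem.Set.inter capSet (PySem.Set.ofList p.2)).length : Int)
        if overlap > st.2 then (some p.1, overlap) else st)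
      (none, 0)
  r.1

-- ===== PRECONDITION & SPEC =====
def Spec_find_best_agent (capabilities : List String) (out : Option String) : Prop := out = find_best_agent_alt capabilities
instance (capabilities : List String) (out : Option String) : Decidable (Spec_find_best_agent capabilities out) := by unfold Spec_find_best_agent; infer_instance

-- ===== CLAIM (what is proved, stated in full; the proofs are below) =====
def Claim_equal_find_best_agent : Prop := ∀ (capabilities : List String), Dom_find_best_agent capabilities → Spec_find_best_agent capabilities (find_best_agent capabilities)

-- ===== LEMMAS AND PROOFS =====

-- the pair-valued "first maximum" fold that mediates between A's max-over-keys and B's running best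
def pvPairStep (a : Option (String × Int)) (q : String × Int) : Option (String × Int) :=
  match a with
  | none => some q
  | some m => if m.2 < q.2 then some q else some m

-- the step of Python's max(keys, key=kf): replace the running best on strictly greater key
def pvKeyStep (kf : String → Int) (a : Option String) (k : String) : Option String :=
  match a with
  | none => some k
  | some m => if kf m < kf k then some k else some m

-- max(keys, key=kf) as a foldl of pvKeyStep
lemma pvMaxEqFold (xs : List String) (kf : String → Int) :
    PySem.List.max? xs kf = xs.foldl (pvKeyStep kf) none := by
  unfold PySem.List.max?
  apply List.foldl_ext
  intro a x _
  cases a <;> rfl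

-- max? over the keys of an association list with an agreeing key function is the pair fold, projected
lemma pvMaxKeys (kf : String → Int) (items : List (String × Int))
    (hk : ∀ p ∈ items, kf p.1 = p.2) :
    ∀ (acc : Option (String × Int)), (∀ m, acc = some m → kf m.1 = m.2) →
    List.foldl (pvKeyStep kf) (acc.map Prod.fst) (items.map Prod.fst)
      = (List.foldl pvPairStep acc items).map Prod.fst := by
  induction items with
  | nil => intro acc _; simp
  | cons p t ih =>
    intro acc hacc
    have hkp : kf p.1 = p.2 := hk p (by simp)
    have hk' : ∀ q ∈ t, kf q.1 = q.2 := fun q hq => hk q (by simp [hq])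
    simp only [List.map_cons, List.foldl_cons]
    cases acc with
    | none =>
      have := ih hk' (some p) (by intro m hm; injection hm with h; subst h; exact hkp)
      simpa [pvPairStep, pvKeyStep] using this
    | some m =>
      have hm : kf m.1 = m.2 := hacc m rfl
      by_cases h : m.2 < p.2
      · have := ih hk' (some p) (by intro m' hm'; injection hm' with h'; subst h'; exact hkp)
        simpa [pvPairStep, pvKeyStep, hm, hkp, h] using this
      · have := ih hk' (some m) (by intro m' hm'; injection hm' with h'; subst h'; exact hm)
        simpa [pvPairStep, pvKeyStep, hm, hkp, h] using this

-- B's running best over the full list equals the pair fold over the positively-scoring entries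
lemma pvRunningBest (g : String × List String → Int) (hg : ∀ p, 0 ≤ g p) :
    ∀ (l : List (String × List String)) (acc : Option (String × Int)),
      (∀ m, acc = some m → 0 < m.2) →
    (l.foldl
        (fun (st : Option String × Int) p => if g p > st.2 then (some p.1, g p) else st)
        (acc.map Prod.fst, (acc.map Prod.snd).getD 0)).1
      = ((l.filter (fun p => decide (0 < g p))).foldl
          (fun a p => pvPairStep a (p.1, g p)) acc).map Prod.fst := by
  intro l
  induction l with
  | nil => intro acc _; simp
  | cons p t ih =>
    intro acc hacc
    simp only [List.foldl_cons, List.filter_cons]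
    cases acc with
    | none =>
      by_cases h : 0 < g p
      · have := ih (some (p.1, g p)) (by intro m hm; injection hm with h'; subst h'; exact h)
        simpa [pvPairStep, h] using this
      · have h0 : g p = 0 := le_antisymm (by omega) (hg p)
        have := ih none (by intro m h'; cases h')
        simpa [h, h0] using this
    | some m =>
      have hm : 0 < m.2 := hacc m rfl
      by_cases h : 0 < g p
      · by_cases h2 : m.2 < g p
        · have := ih (some (p.1, g p)) (by intro m' hm'; injection hm' with h'; subst h'; exact h)
          simpa [pvPairStep, h, h2, gt_iff_lt] using this
        · have := ih (some m) (by intro m' hm'; injection hm' with h'; subst h'; exact hm)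
          simpa [pvPairStep, h, h2, gt_iff_lt] using this
      · have h0 : g p = 0 := le_antisymm (by omega) (hg p)
        have hno : ¬ m.2 < g p := by omega
        have := ih (some m) (by intro m' hm'; injection hm' with h'; subst h'; exact hm)
        simpa [h, hno, gt_iff_lt] using this

-- ===== VERDICT (by name: the statement is the Claim_ definition above) =====
theorem find_best_agent_spec : Claim_equal_find_best_agent := by
  intro capabilities _
  unfold Spec_find_best_agent find_best_agent find_best_agent_alt
  set g : String × List String → Int := fun p => pvOverlap capabilities p.2 with hgdef
  have hg : ∀ p, 0 ≤ g p := fun p => Int.natCast_nonneg _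
  -- A's guarded insert loop is the insert loop over the filtered list
  have hfold :
      AGENT_CAPABILITIES.foldl
        (fun d p => let overlap := pvOverlap capabilities p.2
                    if overlap > 0 then d.insert p.1 overlap else d)
        (PySem.Dict.empty : PySem.Dict String Int)
      = (AGENT_CAPABILITIES.filter (fun p => decide (0 < g p))).foldl
          (fun d p => d.insert p.1 (g p)) PySem.Dict.empty := by
    rw [List.foldl_filter]
    simp only [hgdef, gt_iff_lt, decide_eq_true_eq]
  set lf := AGENT_CAPABILITIES.filter (fun p => decide (0 < g p)) with hlf
  -- the scores dict is exactly the filtered pairs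
  have hnod : (lf.map Prod.fst).Nodup := by
    have hsub : (lf.map Prod.fst).Sublist (AGENT_CAPABILITIES.map Prod.fst) :=
      List.Sublist.map Prod.fst List.filter_sublist
    exact (by decide : (AGENT_CAPABILITIES.map Prod.fst).Nodup).sublist hsub
  have hitems :
      (lf.foldl (fun d p => d.insert p.1 (g p)) (PySem.Dict.empty : PySem.Dict String Int)).items
        = lf.map (fun p => (p.1, g p)) := by
    have := PySem.Dict.items_foldl_insert_fresh (l := lf) (k := Prod.fst) (v := fun p => g p)
      (d := PySem.Dict.empty) (by intro a _; simp [pysem]) hnod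
    simpa using this
  set scores := lf.foldl (fun d p => d.insert p.1 (g p)) (PySem.Dict.empty : PySem.Dict String Int)
    with hscores
  -- key function agreement on the items
  have hkeysnod : scores.keys.Nodup := by
    have e : scores.keys = lf.map Prod.fst := by
      show scores.items.map (fun x => x.1) = _
      rw [hitems, List.map_map]
      rfl
    rw [e]; exact hnod
  have hk : ∀ q ∈ scores.items, scores.getD q.1 0 = q.2 := by
    intro q hq
    rcases q with ⟨k, v⟩
    exact PySem.Dict.getD_of_mem_items scores hq hkeysnod 0
  -- A's result is the projected pair fold from none
  have hA :
      (if scores.size = 0 then none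
       else PySem.List.max? scores.keys (fun k => scores.getD k 0))
      = (scores.items.foldl pvPairStep none).map Prod.fst := by
    by_cases hz : scores.size = 0
    · have hempty : scores.items = [] := List.length_eq_zero_iff.mp hz
      rw [if_pos hz, hempty]
      rfl
    · rw [if_neg hz]
      have := pvMaxKeys (fun k => scores.getD k 0) scores.items hk none
        (by intro m h; cases h)
      have e : scores.keys = scores.items.map Prod.fst := rfl
      rw [pvMaxEqFold, e]
      exact this
  -- B's result is the same projected pair fold
  have hB :
      (AGENT_CAPABILITIES.foldl
        (fun (st : Option String × Int) p =>
          if ((PySem.Set.inter (PySem.Set.ofList capabilities) (PySem.Set.ofList p.2)).length : Int)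
              > st.2
          then (some p.1,
                ((PySem.Set.inter (PySem.Set.ofList capabilities) (PySem.Set.ofList p.2)).length : Int))
          else st)
        (none, 0)).1
      = ((lf.foldl (fun a p => pvPairStep a (p.1, g p)) none)).map Prod.fst := by
    have := pvRunningBest g hg AGENT_CAPABILITIES none (by intro m h; cases h)
    simpa [hgdef, pvOverlap, hlf] using this
  -- pair fold over items = pair fold over lf with (p.1, g p)
  have hfoldmap :
      scores.items.foldl pvPairStep none
        = lf.foldl (fun a p => pvPairStep a (p.1, g p)) none := by
    rw [hitems, List.foldl_map]
  rw [hfold]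
  rw [hA, hfoldmap, ← hB]
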